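-- pv_equiv track=rewrite | github.com/ebarschkis/Zero-Minors-ECDLP | containment.py | get_kth_combination_vec
-- ===== SOURCE A (Python) =====
-- from typing import List, Optional, TextIO
--
-- def get_kth_combination_vec(vec: List[int], n: int, r: int, index: int) -> List[int]:
--     if r < 0 or r > n:
--         raise ValueError(f"invalid r={r}")
--     c = 1
--     k = r if r < (n - r) else (n - r)
--     for i in range(1, k + 1):
--         c = c * (n - k + i)
--         c = c // i
--     if index < 0:
--         index += c
--     if index < 0 or index >= c:
--         raise ValueError(f"invalid index={index}")
--
--     result = []
--     vec_len = n
--     while r: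
--         c = (c * r) // n
--         n -= 1
--         r -= 1
--         while index >= c:
--             index -= c
--             c = c * (n - r) // n
--             n -= 1
--         result.append(vec[vec_len - n - 1])
--     return result
-- ===== SOURCE B (Python) =====
-- def _comb(n, k):
--     if k < 0 or k > n:
--         return 0
--     if n - k < k:
--         k = n - k
--     num = 1
--     den = 1
--     for i in range(k):
--         num = num * (n - i)
--         den = den * (i + 1)
--     return num // den
--
--
-- def get_kth_combination_vec(vec, n, r, index):
--     if r < 0 or r > n:
--         raise ValueError(f"invalid r={r}")
--     total = _comb(n, r)
--     if index < 0:
--         index += total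
--     if index < 0 or index >= total:
--         raise ValueError(f"invalid index={index}")
--     result = []
--     v = 0
--     remaining = r
--     while remaining > 0:
--         cnt = _comb(n - 1 - v, remaining - 1)
--         while index >= cnt:
--             index -= cnt
--             v += 1
--             cnt = _comb(n - 1 - v, remaining - 1)
--         result.append(vec[v])
--         v += 1
--         remaining -= 1
--     return result
-- ===== Notes on version B (the rewrite author's own statement) =====
-- stated objective: alternative
-- what changed: A's single merged unranking loop that carries one incrementally updated count c (c = c*r//n, c = c*(n-r)//n) is replaced by an explicit outer loop over the r output positions with an inner greedy scan that recomputes each count from scratch with a standalone binomial-coefficient helper (falling-factorial/factorial), tracking the candidate position v instead of A's shrinking n.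
-- outside the precondition, e.g. on get_kth_combination_vec([5], 2, 1, 0): A returns [5], B returns [5]
import Mathlib
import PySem

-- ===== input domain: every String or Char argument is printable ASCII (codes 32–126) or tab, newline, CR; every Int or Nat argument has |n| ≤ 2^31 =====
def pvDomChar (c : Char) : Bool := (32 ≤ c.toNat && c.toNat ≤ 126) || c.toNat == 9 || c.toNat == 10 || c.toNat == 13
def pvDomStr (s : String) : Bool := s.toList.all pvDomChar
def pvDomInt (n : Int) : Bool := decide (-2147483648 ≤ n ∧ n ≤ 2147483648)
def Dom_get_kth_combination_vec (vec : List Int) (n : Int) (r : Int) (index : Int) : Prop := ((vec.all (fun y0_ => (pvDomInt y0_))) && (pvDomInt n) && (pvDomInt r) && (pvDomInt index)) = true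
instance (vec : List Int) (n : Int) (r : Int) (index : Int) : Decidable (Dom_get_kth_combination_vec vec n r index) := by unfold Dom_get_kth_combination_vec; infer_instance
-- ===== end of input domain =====

-- B re-organises A's single merged unranking loop (with an incrementally updated count c)
-- into an explicit per-position greedy search that recomputes each count with a standalone
-- binomial-coefficient helper; same return value on Pre_, objective: alternative (not faster).

-- ===== PORT A =====
-- inner 'while index >= c' loop of A; fuel only makes the recursion total (unreachable under Pre_)
def pvInnerA (fuel : Nat) (index c n r : Int) : Int × Int × Int :=
  match fuel with
  | 0 => (index, c, n)
  | f + 1 =>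
    if index ≥ c then
      pvInnerA f (index - c) (PySem.Int.floordiv (c * (n - r)) n) (n - 1) r
    else (index, c, n)

-- outer 'while r' loop of A
def pvOuterA (fuel : Nat) (vec : List Int) (vec_len c n r index : Int) (result : List Int) : List Int :=
  match fuel with
  | 0 => result
  | f + 1 =>
    if r ≠ 0 then
      let c1 := PySem.Int.floordiv (c * r) n
      let n1 := n - 1
      let r1 := r - 1
      let s := pvInnerA f index c1 n1 r1
      pvOuterA f vec vec_len s.2.1 s.2.2 r1 s.1
        (result ++ [(PySem.List.pyGet? vec (vec_len - s.2.2 - 1)).getD 0])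
    else result

def get_kth_combination_vec (vec : List Int) (n : Int) (r : Int) (index : Int) : List Int :=
  if r < 0 ∨ r > n then []  -- Python raises ValueError here (outside Pre_)
  else
    let k := if r < n - r then r else n - r
    let c := (PySem.List.pyRange 1 (k + 1) 1).foldl
      (fun c i => PySem.Int.floordiv (c * (n - k + i)) i) 1
    let index1 := if index < 0 then index + c else index
    if index1 < 0 ∨ index1 ≥ c then []  -- Python raises ValueError here (outside Pre_)
    else pvOuterA (n.toNat + r.toNat + 1) vec n c n r index1 []

-- ===== PORT B =====
-- B's standalone binomial helper _comb
def pvCombB (n k : Int) : Int :=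
  if k < 0 ∨ k > n then 0
  else
    let k1 := if n - k < k then n - k else k
    let p := (PySem.List.pyRange 0 k1 1).foldl
      (fun (p : Int × Int) i => (p.1 * (n - i), p.2 * (i + 1))) (1, 1)
    PySem.Int.floordiv p.1 p.2

-- B's inner 'while index >= cnt' scan over candidate values v
def pvInnerB (fuel : Nat) (index v n remaining : Int) : Int × Int :=
  match fuel with
  | 0 => (index, v)
  | f + 1 =>
    if index ≥ pvCombB (n - 1 - v) (remaining - 1) then
      pvInnerB f (index - pvCombB (n - 1 - v) (remaining - 1)) (v + 1) n remaining
    else (index, v)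

-- B's outer loop over the r output positions
def pvOuterB (fuel : Nat) (vec : List Int) (n index v remaining : Int) (result : List Int) : List Int :=
  match fuel with
  | 0 => result
  | f + 1 =>
    if remaining > 0 then
      let s := pvInnerB f index v n remaining
      pvOuterB f vec n s.1 (s.2 + 1) (remaining - 1)
        (result ++ [(PySem.List.pyGet? vec s.2).getD 0])
    else result

def get_kth_combination_vec_alt (vec : List Int) (n : Int) (r : Int) (index : Int) : List Int :=
  if r < 0 ∨ r > n then []  -- Python raises ValueError here (outside Pre_)
  else
    let total := pvCombB n r
    let index1 := if index < 0 then index + total else index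
    if index1 < 0 ∨ index1 ≥ total then []  -- Python raises ValueError here (outside Pre_)
    else pvOuterB (n.toNat + r.toNat + 1) vec n index1 0 r []

-- ===== PRECONDITION & SPEC =====
-- exact binomial coefficient C(n, r), by the falling-factorial / factorial product (used
-- only by Pre_; equals Nat.choose n r for r ≤ n, proved below)
def pvChoose (n r : Nat) : Nat :=
  Nat.descFactorial n (min r (n - r)) / Nat.factorial (min r (n - r))

-- Pre_ excludes exactly the inputs where A raises: ValueError when r < 0, r > n or index
-- outside [-C(n,r), C(n,r)), and IndexError when the selected combination indexes past
-- len(vec). The IndexError condition is approximated by the closed-form shape bound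
-- n ≤ len(vec) (except r = 0, which never indexes vec); this also excludes the rare inputs
-- with a short vec on which the chosen combination happens to stay inside vec and A returns
-- normally (B returns the same value there, see the cite).
def Pre_get_kth_combination_vec (vec : List Int) (n : Int) (r : Int) (index : Int) : Prop :=
  0 ≤ r ∧ r ≤ n ∧ (r = 0 ∨ n ≤ (vec.length : Int)) ∧
  -((pvChoose n.toNat r.toNat : Nat) : Int) ≤ index ∧
  index < ((pvChoose n.toNat r.toNat : Nat) : Int)

instance (vec : List Int) (n : Int) (r : Int) (index : Int) : Decidable (Pre_get_kth_combination_vec vec n r index) := by unfold Pre_get_kth_combination_vec; infer_instance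

def pvWitness_get_kth_combination_vec : List Int × Int × Int × Int := ([1, 2, 3, 4], 4, 2, 5)

def Spec_get_kth_combination_vec (vec : List Int) (n : Int) (r : Int) (index : Int) (out : List Int) : Prop := out = get_kth_combination_vec_alt vec n r index
instance (vec : List Int) (n : Int) (r : Int) (index : Int) (out : List Int) : Decidable (Spec_get_kth_combination_vec vec n r index out) := by unfold Spec_get_kth_combination_vec; infer_instance

-- ===== CLAIM (what is proved, stated in full; the proofs are below) =====
def Claim_equal_get_kth_combination_vec : Prop := ∀ (vec : List Int) (n : Int) (r : Int) (index : Int), Dom_get_kth_combination_vec vec n r index → Pre_get_kth_combination_vec vec n r index → Spec_get_kth_combination_vec vec n r index (get_kth_combination_vec vec n r index)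

-- ===== LEMMAS AND PROOFS =====

-- Pre_'s helper computes the true binomial coefficient
theorem pv_choose_eq (n r : Nat) (h : r ≤ n) : pvChoose n r = Nat.choose n r := by
  unfold pvChoose
  rw [← Nat.choose_eq_descFactorial_div_factorial]
  rcases Nat.le_total r (n - r) with hle | hle
  · rw [show min r (n - r) = r by omega]
  · rw [show min r (n - r) = n - r by omega]
    exact Nat.choose_symm h

-- exact-division identities for binomial coefficients, stated on PySem.Int.floordiv
theorem pv_id1 (m s : Nat) (hs : 1 ≤ s) (hsm : s ≤ m) :
    PySem.Int.floordiv ((Nat.choose m s : Int) * (s : Int)) (m : Int)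
      = (Nat.choose (m - 1) (s - 1) : Int) := by
  have hm : 1 ≤ m := le_trans hs hsm
  have key : Nat.choose m s * s = m * Nat.choose (m - 1) (s - 1) := by
    have h := Nat.succ_mul_choose_eq (m - 1) (s - 1)
    have h1 : m - 1 + 1 = m := by omega
    have h2 : s - 1 + 1 = s := by omega
    simp only [Nat.succ_eq_add_one, h1, h2] at h
    omega
  have hcast : ((Nat.choose m s : Int) * (s : Int)) = ((Nat.choose m s * s : Nat) : Int) := by
    push_cast; ring
  rw [hcast, PySem.Int.floordiv_natCast, key, Nat.mul_div_cancel_left _ (by omega)]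

theorem pv_id2 (m s : Nat) (hm : 1 ≤ m) (hsm : s ≤ m) :
    PySem.Int.floordiv ((Nat.choose m s : Int) * ((m : Int) - (s : Int))) (m : Int)
      = (Nat.choose (m - 1) s : Int) := by
  have key : Nat.choose m s * (m - s) = m * Nat.choose (m - 1) s := by
    have h := Nat.choose_mul_succ_eq (m - 1) s
    have h1 : m - 1 + 1 = m := by omega
    rw [h1] at h
    have hc := Nat.mul_comm ((m - 1).choose s) m
    omega
  have hcast : ((Nat.choose m s : Int) * ((m : Int) - (s : Int)))
      = ((Nat.choose m s * (m - s) : Nat) : Int) := by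
    have : ((m - s : Nat) : Int) = (m : Int) - (s : Int) := by omega
    push_cast [this]; ring
  rw [hcast, PySem.Int.floordiv_natCast, key, Nat.mul_div_cancel_left _ (by omega)]

-- A's precount loop computes C(b+j, j)
theorem pv_precount (j b : Nat) :
    (PySem.List.pyRange 1 ((j : Int) + 1) 1).foldl
      (fun c i => PySem.Int.floordiv (c * ((b : Int) + i)) i) 1
      = (Nat.choose (b + j) j : Int) := by
  induction j with
  | zero => simp [PySem.List.pyRange_one_eq_nil]
  | succ t ih =>
    have hsplit : PySem.List.pyRange 1 (((t + 1 : Nat) : Int) + 1) 1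
        = PySem.List.pyRange 1 ((t : Int) + 1) 1 ++ [(t : Int) + 1] := by
      have := PySem.List.pyRange_one_succ_right (a := 1) (b := (t : Int) + 1) (by omega)
      push_cast
      exact this
    rw [hsplit, List.foldl_append, ih]
    simp only [List.foldl]
    have key : Nat.choose (b + t) t * (b + t + 1) = Nat.choose (b + (t + 1)) (t + 1) * (t + 1) := by
      have h := Nat.succ_mul_choose_eq (b + t) t
      simp only [Nat.succ_eq_add_one] at h
      have he : b + t + 1 = b + (t + 1) := by omega
      rw [he] at h
      have hc := Nat.mul_comm (b + (t + 1)) ((b + t).choose t)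
      rw [he]
      omega
    have hcast : ((Nat.choose (b + t) t : Int) * ((b : Int) + ((t : Int) + 1)))
        = ((Nat.choose (b + t) t * (b + t + 1) : Nat) : Int) := by push_cast; ring
    have hc2 : ((t : Int) + 1) = (((t + 1 : Nat)) : Int) := by push_cast; ring
    rw [hcast, hc2, PySem.Int.floordiv_natCast, key, Nat.mul_div_cancel _ (by omega)]

-- B's fold computes the falling factorial and the factorial
theorem pv_fold_df (n : Int) : ∀ (j : Nat), (j : Int) ≤ n →
    (PySem.List.pyRange 0 (j : Int) 1).foldl
      (fun (p : Int × Int) i => (p.1 * (n - i), p.2 * (i + 1))) (1, 1)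
      = ((Nat.descFactorial n.toNat j : Int), (Nat.factorial j : Int)) := by
  intro j
  induction j with
  | zero => intro _; simp [PySem.List.pyRange_one_eq_nil]
  | succ t ih =>
    intro hj
    have ht : (t : Int) ≤ n := by push_cast at hj ⊢; omega
    have hsplit : PySem.List.pyRange 0 (((t + 1 : Nat)) : Int) 1
        = PySem.List.pyRange 0 (t : Int) 1 ++ [(t : Int)] := by
      have := PySem.List.pyRange_one_succ_right (a := 0) (b := (t : Int)) (by positivity)
      push_cast
      exact this
    rw [hsplit, List.foldl_append, ih ht]
    simp only [List.foldl]
    have hcast1 : n - (t : Int) = ((n.toNat - t : Nat) : Int) := by omega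
    refine Prod.ext ?_ ?_
    · show (Nat.descFactorial n.toNat t : Int) * (n - (t : Int)) = _
      rw [hcast1, Nat.descFactorial_succ]
      push_cast
      ring
    · show (Nat.factorial t : Int) * ((t : Int) + 1) = _
      rw [Nat.factorial_succ]
      push_cast
      ring

-- B's helper computes the binomial coefficient
theorem pv_combB_correct (n k : Int) (h0 : 0 ≤ k) (h1 : k ≤ n) :
    pvCombB n k = (Nat.choose n.toNat k.toNat : Int) := by
  have hn : 0 ≤ n := le_trans h0 h1
  simp only [pvCombB]
  rw [if_neg (by omega)]
  by_cases hcase : n - k < k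
  · rw [if_pos hcase]
    have hj : ((n - k).toNat : Int) = n - k := by omega
    have hfold := pv_fold_df n ((n - k).toNat) (by omega)
    rw [hj] at hfold
    rw [hfold, PySem.Int.floordiv_natCast, ← Nat.choose_eq_descFactorial_div_factorial]
    have h2 : (n - k).toNat = n.toNat - k.toNat := by omega
    rw [h2, Nat.choose_symm (by omega)]
  · rw [if_neg hcase]
    have hj : (k.toNat : Int) = k := by omega
    have hfold := pv_fold_df n k.toNat (by omega)
    rw [hj] at hfold
    rw [hfold, PySem.Int.floordiv_natCast, ← Nat.choose_eq_descFactorial_div_factorial]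

-- inner loops run in lockstep
theorem pv_inner_lock : ∀ (f m s : Nat) (index n0 v : Int),
    s ≤ m → m - s ≤ f → 0 ≤ index → index < (Nat.choose (m + 1) (s + 1) : Int) →
    n0 - 1 - v = (m : Int) →
    ∃ (m' : Nat) (index' : Int), s ≤ m' ∧ m' ≤ m ∧ 0 ≤ index' ∧
      index' < (Nat.choose m' s : Int) ∧
      pvInnerA f index (Nat.choose m s : Int) (m : Int) (s : Int)
        = (index', (Nat.choose m' s : Int), (m' : Int)) ∧
      pvInnerB f index v n0 ((s : Int) + 1) = (index', n0 - 1 - (m' : Int)) := by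
  intro f
  induction f with
  | zero =>
    intro m s index n0 v hsm hf h0 hlt hrel
    have hms : m = s := by omega
    subst hms
    refine ⟨m, index, le_refl _, le_refl _, h0, ?_, rfl, ?_⟩
    · simpa [Nat.choose_self] using hlt
    · simp only [pvInnerB]
      rw [show n0 - 1 - (m : Int) = v by omega]
  | succ g ih =>
    intro m s index n0 v hsm hf h0 hlt hrel
    have hcnt : pvCombB (n0 - 1 - v) ((s : Int) + 1 - 1) = (Nat.choose m s : Int) := by
      rw [show (s : Int) + 1 - 1 = (s : Int) by ring, hrel,
        pv_combB_correct (m : Int) (s : Int) (by positivity) (by exact_mod_cast hsm)]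
      simp
    by_cases hge : index ≥ (Nat.choose m s : Int)
    · -- skip step
      have hslt : s < m := by
        by_contra hc
        have hms : m = s := by omega
        subst hms
        rw [Nat.choose_self] at hge
        rw [Nat.choose_self] at hlt
        push_cast at hge hlt
        omega
      have hm1 : (1 : Nat) ≤ m := by omega
      have hcss : Nat.choose (m + 1) (s + 1) = Nat.choose m s + Nat.choose m (s + 1) := by
        simpa [Nat.succ_eq_add_one] using Nat.choose_succ_succ m s
      have hbound : index - (Nat.choose m s : Int) < (Nat.choose (m - 1 + 1) (s + 1) : Int) := by
        rw [show m - 1 + 1 = m by omega]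
        rw [hcss] at hlt
        push_cast at hlt
        omega
      obtain ⟨m', index', h1, h2, h3, h4, hA, hB⟩ :=
        ih (m - 1) s (index - (Nat.choose m s : Int)) n0 (v + 1)
          (by omega) (by omega) (by omega) hbound (by omega)
      refine ⟨m', index', h1, by omega, h3, h4, ?_, ?_⟩
      · simp only [pvInnerA, if_pos hge]
        rw [show (m : Int) - (s : Int) = ((m : Int) - (s : Int)) by rfl]
        rw [pv_id2 m s hm1 (by omega)]
        rw [show (m : Int) - 1 = ((m - 1 : Nat) : Int) by omega]
        exact hA
      · simp only [pvInnerB]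
        rw [hcnt, if_pos hge]
        exact hB
    · -- exit
      refine ⟨m, index, hsm, le_refl _, h0, by omega, ?_, ?_⟩
      · simp only [pvInnerA, if_neg hge]
      · simp only [pvInnerB]
        rw [hcnt, if_neg hge]
        rw [show n0 - 1 - (m : Int) = v by omega]

-- outer loops run in lockstep
theorem pv_outer_lock : ∀ (s m f : Nat) (index n0 v : Int) (vec acc : List Int),
    s ≤ m → m + 1 ≤ f → 0 ≤ index → index < (Nat.choose m s : Int) →
    n0 - v = (m : Int) →
    pvOuterA f vec n0 (Nat.choose m s : Int) (m : Int) (s : Int) index acc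
      = pvOuterB f vec n0 index v (s : Int) acc := by
  intro s
  induction s with
  | zero =>
    intro m f index n0 v vec acc hsm hf h0 hlt hrel
    obtain ⟨g, rfl⟩ : ∃ g, f = g + 1 := ⟨f - 1, by omega⟩
    simp [pvOuterA, pvOuterB]
  | succ t ih =>
    intro m f index n0 v vec acc hsm hf h0 hlt hrel
    obtain ⟨g, rfl⟩ : ∃ g, f = g + 1 := ⟨f - 1, by omega⟩
    have hm1 : (1 : Nat) ≤ m := by omega
    have hc1 : PySem.Int.floordiv ((Nat.choose m (t + 1) : Int) * (((t + 1 : Nat)) : Int)) (m : Int)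
        = (Nat.choose (m - 1) t : Int) := by
      have := pv_id1 m (t + 1) (by omega) hsm
      simpa using this
    have hbound : index < (Nat.choose (m - 1 + 1) (t + 1) : Int) := by
      rw [show m - 1 + 1 = m by omega]; exact hlt
    obtain ⟨m', index', h1, h2, h3, h4, hA, hB⟩ :=
      pv_inner_lock g (m - 1) t index n0 v (by omega) (by omega) h0 hbound (by omega)
    have goalA : pvOuterA (g + 1) vec n0 (Nat.choose m (t + 1) : Int) (m : Int)
        (((t + 1 : Nat)) : Int) index acc
        = pvOuterA g vec n0 (Nat.choose m' t : Int) (m' : Int) ((t : Int)) index'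
            (acc ++ [(PySem.List.pyGet? vec (n0 - (m' : Int) - 1)).getD 0]) := by
      simp only [pvOuterA]
      rw [if_pos (by push_cast; omega)]
      rw [show ((t + 1 : Nat) : Int) - 1 = (t : Int) by push_cast; ring]
      rw [hc1]
      rw [show (m : Int) - 1 = ((m - 1 : Nat) : Int) by omega]
      rw [hA]
    have goalB : pvOuterB (g + 1) vec n0 index v (((t + 1 : Nat)) : Int) acc
        = pvOuterB g vec n0 index' ((n0 - 1 - (m' : Int)) + 1) ((t : Int))
            (acc ++ [(PySem.List.pyGet? vec (n0 - 1 - (m' : Int))).getD 0]) := by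
      simp only [pvOuterB]
      rw [if_pos (by push_cast; omega)]
      rw [show ((t + 1 : Nat) : Int) = (t : Int) + 1 by push_cast; ring]
      rw [show (t : Int) + 1 - 1 = (t : Int) by ring]
      rw [hB]
    rw [goalA, goalB]
    rw [show n0 - (m' : Int) - 1 = n0 - 1 - (m' : Int) by ring]
    exact ih m' g index' n0 (n0 - 1 - (m' : Int) + 1) vec _ h1 (by omega) h3 h4 (by omega)

-- ===== VERDICT (by name: the statement is the Claim_ definition above) =====
theorem get_kth_combination_vec_spec : Claim_equal_get_kth_combination_vec := by
  intro vec n r index _ hpre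
  obtain ⟨hr0, hrn, _, hneg, hlt⟩ := hpre
  unfold Spec_get_kth_combination_vec
  have hn0 : (0 : Int) ≤ n := le_trans hr0 hrn
  set N := n.toNat with hN
  set R := r.toNat with hR
  have hrcast : (R : Int) = r := by omega
  have hncast : (N : Int) = n := by omega
  have hRN : R ≤ N := by omega
  have hCpos : (0 : Int) < (Nat.choose N R : Int) := by
    exact_mod_cast Nat.choose_pos hRN
  rw [pv_choose_eq N R hRN] at hneg hlt
  have hneg' : -((Nat.choose N R : Nat) : Int) ≤ index := hneg
  have hlt' : index < ((Nat.choose N R : Nat) : Int) := hlt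
  clear hneg hlt
  simp only [get_kth_combination_vec, get_kth_combination_vec_alt]
  rw [if_neg (by omega : ¬(r < 0 ∨ r > n)), if_neg (by omega : ¬(r < 0 ∨ r > n))]
  have hB : pvCombB n r = (Nat.choose N R : Int) := pv_combB_correct n r hr0 hrn
  rw [hB]
  by_cases hk : r < n - r
  · simp only [if_pos hk]
    have hcA := pv_precount R ((n - r).toNat)
    rw [show (((n - r).toNat : Nat) : Int) = n - r by omega, hrcast,
      show (n - r).toNat + R = N by omega] at hcA
    rw [hcA]
    by_cases hio : index < 0
    · simp only [if_pos hio]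
      rw [if_neg (by omega), if_neg (by omega)]
      rw [← hncast, ← hrcast]
      exact pv_outer_lock R N (N + R + 1) (index + (Nat.choose N R : Int)) (N : Int) 0 vec []
        hRN (by omega) (by omega) (by omega) (by omega)
    · simp only [if_neg hio]
      rw [if_neg (by omega), if_neg (by omega)]
      rw [← hncast, ← hrcast]
      exact pv_outer_lock R N (N + R + 1) index (N : Int) 0 vec []
        hRN (by omega) (by omega) (by omega) (by omega)
  · simp only [if_neg hk]
    have hcA := pv_precount ((n - r).toNat) R
    rw [show (((n - r).toNat : Nat) : Int) = n - r by omega] at hcA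
    rw [show R + (n - r).toNat = N by omega] at hcA
    rw [show (n - r).toNat = N - R by omega, Nat.choose_symm hRN] at hcA
    rw [show n - (n - r) = (R : Int) by omega]
    rw [hcA]
    by_cases hio : index < 0
    · simp only [if_pos hio]
      rw [if_neg (by omega), if_neg (by omega)]
      rw [← hncast, ← hrcast]
      exact pv_outer_lock R N (N + R + 1) (index + (Nat.choose N R : Int)) (N : Int) 0 vec []
        hRN (by omega) (by omega) (by omega) (by omega)
    · simp only [if_neg hio]
      rw [if_neg (by omega), if_neg (by omega)]
      rw [← hncast, ← hrcast]
      exact pv_outer_lock R N (N + R + 1) index (N : Int) 0 vec []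
        hRN (by omega) (by omega) (by omega) (by omega)
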